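-- pv_equiv track=rewrite | github.com/gabriellaec/desoft-analise-exercicios | backup/user_105/ch92_2019_10_02_17_58_05_162031.py | simplifica_dict
-- ===== SOURCE A (Python) =====
-- def simplifica_dict(dicio1):
--     lista_simplificada = []
--     x = dicio1.values()
--     for i in dicio1:
--         if i not in lista_simplificada:
--             lista_simplificada.append(i)
--     for n in x:
--         if n not in lista_simplificada:
--             lista_simplificada.append(n)
--
--     return lista_simplificada
-- ===== SOURCE B (Python) =====
-- def simplifica_dict(dicio1):
--     # Recursive head-and-filter dedup: take the first element, delete all its
--     # later occurrences from the remainder, recurse. No membership test against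
--     # the growing result list is ever performed.
--     def uniq(xs):
--         if not xs:
--             return []
--         cabeca = xs[0]
--         resto = [y for y in xs[1:] if y != cabeca]
--         return [cabeca] + uniq(resto)
--     return uniq(list(dicio1) + list(dicio1.values()))
-- ===== Notes on version B (the rewrite author's own statement) =====
-- stated objective: alternative
-- what changed: Replaces A's two sequential append-if-not-already-in-result loops with a recursive head-and-filter deduplication over the concatenated keys+values sequence: keep the head, filter all its later occurrences out of the tail, recurse; no membership test against the accumulated result exists in B.
import Mathlib
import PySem

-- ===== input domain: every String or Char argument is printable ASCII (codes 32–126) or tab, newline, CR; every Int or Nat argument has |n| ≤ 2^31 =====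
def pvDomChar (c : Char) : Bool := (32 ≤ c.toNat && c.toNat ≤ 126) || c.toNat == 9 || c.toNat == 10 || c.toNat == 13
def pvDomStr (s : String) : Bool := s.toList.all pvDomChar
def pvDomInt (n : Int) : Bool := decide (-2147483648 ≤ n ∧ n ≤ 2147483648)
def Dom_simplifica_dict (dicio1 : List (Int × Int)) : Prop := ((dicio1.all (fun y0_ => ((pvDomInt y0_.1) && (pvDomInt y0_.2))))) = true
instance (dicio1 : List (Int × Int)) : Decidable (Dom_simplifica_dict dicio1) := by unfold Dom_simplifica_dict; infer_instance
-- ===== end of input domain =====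

-- B deduplicates keys+values by a recursive head-and-filter pass (no membership test
-- against the result) instead of A's two append-if-absent loops; same cost, different algorithm.

-- ===== PORT A =====
def simplifica_dict (dicio1 : List (Int × Int)) : List Int :=
  let d := PySem.Dict.ofList dicio1
  let x := d.values
  let lista1 := d.keys.foldl (fun acc i => if i ∈ acc then acc else acc ++ [i]) []
  x.foldl (fun acc n => if n ∈ acc then acc else acc ++ [n]) lista1

-- ===== PORT B =====
-- recursive head-and-filter dedup, transliterating Source B's uniq
def uniqB (xs : List Int) : List Int :=
  match xs with
  | [] => []
  | cabeca :: cauda =>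
    let resto := cauda.filter (fun y => y ≠ cabeca)
    cabeca :: uniqB resto
termination_by xs.length
decreasing_by
  simp only [List.length_unattach, List.length_cons]
  exact Nat.lt_succ_of_le (le_trans (List.length_filter_le _ _) (by simp))

def simplifica_dict_alt (dicio1 : List (Int × Int)) : List Int :=
  let d := PySem.Dict.ofList dicio1
  uniqB (d.keys ++ d.values)

-- ===== PRECONDITION & SPEC =====
def Spec_simplifica_dict (dicio1 : List (Int × Int)) (out : List Int) : Prop := out = simplifica_dict_alt dicio1
instance (dicio1 : List (Int × Int)) (out : List Int) : Decidable (Spec_simplifica_dict dicio1 out) := by unfold Spec_simplifica_dict; infer_instance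

-- ===== CLAIM (what is proved, stated in full; the proofs are below) =====
def Claim_equal_simplifica_dict : Prop := ∀ (dicio1 : List (Int × Int)), Dom_simplifica_dict dicio1 → Spec_simplifica_dict dicio1 (simplifica_dict dicio1)

-- ===== LEMMAS AND PROOFS =====

-- A's append-if-absent step, started on p ++ q, keeps p fixed and ignores every element of p.
theorem foldl_addStep_split (l : List Int) : ∀ (p q : List Int),
    l.foldl (fun acc i => if i ∈ acc then acc else acc ++ [i]) (p ++ q)
      = p ++ (l.filter (fun y => y ∉ p)).foldl (fun acc i => if i ∈ acc then acc else acc ++ [i]) q := by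
  induction l with
  | nil => intro p q; simp
  | cons y l ih =>
    intro p q
    by_cases hp : y ∈ p
    · simp [List.foldl_cons, hp, ih p q]
    · by_cases hq : y ∈ q
      · simp [List.foldl_cons, hp, hq, ih p q]
      · have hpq : y ∉ p ++ q := by simp [hp, hq]
        simp only [List.foldl_cons, if_neg hpq, List.append_assoc]
        simpa [hp, hq] using ih p (q ++ [y])

-- A's whole dedup loop equals B's recursive head-and-filter dedup.
theorem foldl_addStep_eq_uniqB (l : List Int) :
    l.foldl (fun acc i => if i ∈ acc then acc else acc ++ [i]) [] = uniqB l := by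
  induction hn : l.length using Nat.strong_induction_on generalizing l with
  | _ n ih =>
    match l with
    | [] => simp [uniqB]
    | x :: xs =>
      have h1 := foldl_addStep_split xs [x] []
      have hlen : (xs.filter (fun y => y ∉ [x])).length < n := by
        subst hn
        simp only [List.length_cons]
        exact Nat.lt_succ_of_le (List.length_filter_le _ _)
      have h2 := ih _ hlen (xs.filter (fun y => y ∉ [x])) rfl
      have hfil : (xs.filter (fun y => y ∉ [x])) = xs.filter (fun y => y ≠ x) := by
        simp
      calc (x :: xs).foldl (fun acc i => if i ∈ acc then acc else acc ++ [i]) []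
          = xs.foldl (fun acc i => if i ∈ acc then acc else acc ++ [i]) ([x] ++ []) := by
            simp [List.foldl_cons]
        _ = [x] ++ (xs.filter (fun y => y ∉ [x])).foldl (fun acc i => if i ∈ acc then acc else acc ++ [i]) [] := h1
        _ = [x] ++ uniqB (xs.filter (fun y => y ≠ x)) := by rw [h2, hfil]
        _ = uniqB (x :: xs) := by rw [uniqB]; simp

-- ===== VERDICT (by name: the statement is the Claim_ definition above) =====
theorem simplifica_dict_spec : Claim_equal_simplifica_dict := by
  intro dicio1 _
  unfold Spec_simplifica_dict simplifica_dict simplifica_dict_alt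
  simp only [← List.foldl_append]
  exact foldl_addStep_eq_uniqB _
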